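-- pv_equiv track=rewrite | github.com/clyde-brown/mom-document-parsing | document_parsing_engine/domain/segment_reconstruction/column_merge.py | merge_data_row_by_runs
-- ===== SOURCE A (Python) =====
-- def merge_data_row_by_runs(row: list, run_lengths: list[int]) -> list[str]:
--     """
--     데이터 행을 run 구간별로 잘라, 각 구간의 셀을 한 문자열로 합쳐서 반환.
--     """
--     out = []
--     start = 0
--     for length in run_lengths:
--         end = start + length
--         chunk = row[start:end] if end <= len(row) else row[start:]
--         merged = " ".join(str(c).strip() for c in chunk if str(c).strip())
--         out.append(merged)
--         start = end
--     return out
-- ===== SOURCE B (Python) =====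
-- def merge_data_row_by_runs(row: list, run_lengths: list[int]) -> list[str]:
--     """Single forward pass consuming an iterator over the row: for each run,
--     pull up to `length` cells off the iterator (stopping when the row runs out),
--     stripping and collecting the non-empty ones — no index arithmetic, no slicing."""
--     it = iter(row)
--     out = []
--     for length in run_lengths:
--         parts = []
--         try:
--             for _ in range(length):
--                 s = str(next(it)).strip()
--                 if s:
--                     parts.append(s)
--         except StopIteration:
--             pass
--         out.append(" ".join(parts))
--     return out
-- ===== Notes on version B (the rewrite author's own statement) =====
-- stated objective: alternative
-- what changed: B makes a single forward pass consuming an iterator over the row, pulling up to `length` cells per run with a countdown (stopping via StopIteration when the row runs out), instead of A's boundary arithmetic with a running start index and slicing; Pre_ keeps to the task's natural domain, admitting negative run lengths only where they are provably harmless (empty row, row already exhausted, or an all-negative tail with nonnegative boundaries).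
-- outside the precondition, e.g. on merge_data_row_by_runs(['a', 'b', 'c'], [-1]): A returns ['a b'], B returns ['']
import Mathlib
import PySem

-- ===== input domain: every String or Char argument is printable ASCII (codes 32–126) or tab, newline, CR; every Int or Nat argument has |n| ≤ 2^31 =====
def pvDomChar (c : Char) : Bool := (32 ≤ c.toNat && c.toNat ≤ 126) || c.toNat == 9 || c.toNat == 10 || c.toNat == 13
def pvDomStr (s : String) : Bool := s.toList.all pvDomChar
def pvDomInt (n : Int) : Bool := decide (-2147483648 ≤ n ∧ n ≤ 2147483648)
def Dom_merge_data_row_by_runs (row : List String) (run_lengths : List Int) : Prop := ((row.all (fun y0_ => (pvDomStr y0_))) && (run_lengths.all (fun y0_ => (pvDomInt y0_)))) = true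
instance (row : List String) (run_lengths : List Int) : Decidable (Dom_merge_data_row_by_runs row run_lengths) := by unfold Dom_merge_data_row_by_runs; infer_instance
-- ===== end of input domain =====

-- B replaces A's running-index slicing with a single forward pass that consumes an iterator
-- over the row, pulling up to `length` cells per run; same cost, different traversal.
-- Pre_ keeps to nonnegative (or provably harmless negative) run lengths — see its comment.


-- ===== PORT A =====
-- for-loop over run_lengths keeping (out, start); guard end ≤ len(row), else row[start:];
-- merged = " ".join(str(c).strip() for c in chunk if str(c).strip())
def merge_data_row_by_runs (row : List String) (run_lengths : List Int) : List String :=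
  (run_lengths.foldl (fun (st : List String × Int) length =>
      let start := st.2
      let e := start + length
      let chunk := if e ≤ (row.length : Int)
        then PySem.List.slice row (some start) (some e)
        else PySem.List.slice row (some start) none
      let merged := PySem.Str.join " "
        ((chunk.filter (fun c => PySem.Str.strip c != "")).map PySem.Str.strip)
      (st.1 ++ [merged], e)) ([], 0)).1

-- ===== PORT B =====
-- inner 'for _ in range(length): s = str(next(it)).strip(); if s: parts.append(s)'
-- with the StopIteration break; returns (parts, remaining iterator)
def pvPullRun (rem : List String) (n : Nat) (parts : List String) : List String × List String :=
  match n, rem with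
  | 0, _ => (parts, rem)
  | _ + 1, [] => (parts, [])            -- StopIteration: stop this run
  | m + 1, c :: rest =>
      let s := PySem.Str.strip c
      pvPullRun rest m (if s != "" then parts ++ [s] else parts)

-- outer loop: state (out, remaining iterator); out.append(" ".join(parts))
def merge_data_row_by_runs_alt (row : List String) (run_lengths : List Int) : List String :=
  (run_lengths.foldl (fun (st : List String × List String) length =>
      let r := pvPullRun st.2 length.toNat []
      (st.1 ++ [PySem.Str.join " " r.1], r.2)) ([], row)).1

-- ===== PRECONDITION & SPEC =====
-- Pre_ excludes negative run lengths (outside the task's natural domain) except where they are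
-- provably harmless — empty row, row already exhausted, or an all-negative tail with nonnegative
-- boundaries: elsewhere A's slice bounds move backwards or wrap around, re-reading earlier cells.
def Pre_merge_data_row_by_runs (row : List String) (run_lengths : List Int) : Prop :=
  row = [] ∨
  ∀ i, i < run_lengths.length → run_lengths.getD i 0 < 0 →
    (row.length : Int) ≤ ((run_lengths.take (i + 1)).sum) ∨
    ((∀ j, j < run_lengths.length → i ≤ j → run_lengths.getD j 0 < 0) ∧ 0 ≤ run_lengths.sum)
instance (row : List String) (run_lengths : List Int) : Decidable (Pre_merge_data_row_by_runs row run_lengths) := by unfold Pre_merge_data_row_by_runs; infer_instance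

def pvWitness_merge_data_row_by_runs : List String × List Int := ([" a ", "", "b", "c"], [2, 1, 3])

def Spec_merge_data_row_by_runs (row : List String) (run_lengths : List Int) (out : List String) : Prop := out = merge_data_row_by_runs_alt row run_lengths
instance (row : List String) (run_lengths : List Int) (out : List String) : Decidable (Spec_merge_data_row_by_runs row run_lengths out) := by unfold Spec_merge_data_row_by_runs; infer_instance

-- ===== CLAIM (what is proved, stated in full; the proofs are below) =====
def Claim_equal_merge_data_row_by_runs : Prop := ∀ (row : List String) (run_lengths : List Int), Dom_merge_data_row_by_runs row run_lengths → Pre_merge_data_row_by_runs row run_lengths → Spec_merge_data_row_by_runs row run_lengths (merge_data_row_by_runs row run_lengths)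

-- ===== LEMMAS AND PROOFS =====

-- B's inner loop pulls take n / drop n of the remaining row, stripping and filtering
theorem pvPullRun_eq (n : Nat) (rem acc : List String) :
    pvPullRun rem n acc
      = (acc ++ ((rem.take n).map PySem.Str.strip).filter (fun s => s != ""), rem.drop n) := by
  induction n generalizing rem acc with
  | zero => simp [pvPullRun]
  | succ m ih =>
    cases rem with
    | nil => simp [pvPullRun]
    | cons c rest =>
      simp only [pvPullRun, ih, List.take_succ_cons, List.map_cons, List.filter_cons,
        List.drop_succ_cons]
      by_cases h : (PySem.Str.strip c != "") = true <;> simp [h]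

-- A's guarded slice at a Nat position equals take-of-drop
theorem chunkA_eq (row : List String) (k m : Nat) :
    (if ((k + m : Nat) : Int) ≤ (row.length : Int)
      then PySem.List.slice row (some (k : Int)) (some ((k + m : Nat) : Int))
      else PySem.List.slice row (some (k : Int)) none)
      = (row.drop k).take m := by
  have hc : ((k + m : Nat) : Int) = (k : Int) + (m : Int) := by push_cast; ring
  rw [hc]
  split_ifs with h
  · exact PySem.List.slice_natCast_add row k m
  · rw [PySem.List.slice_from_natCast]
    exact (List.take_of_length_le (by simp; omega)).symm

-- per-chunk merged string: A's filter-then-map equals B's map-then-filter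
theorem merged_eq (chunk : List String) :
    PySem.Str.join " " ((chunk.filter (fun c => PySem.Str.strip c != "")).map PySem.Str.strip)
      = PySem.Str.join " " ((chunk.map PySem.Str.strip).filter (fun s => s != "")) := by
  rw [List.filter_map]
  rfl

-- a slice starting at or past the end of the list is empty
theorem slice_nil_of_ge (row : List String) (s : Int) (h : (row.length : Int) ≤ s) (b? : Option Int) :
    PySem.List.slice row (some s) b? = [] := by
  have h0 : 0 ≤ s := le_trans (by positivity) h
  have h2 : PySem.List.clampIdx row.length s = row.length := by
    unfold PySem.List.clampIdx
    rw [if_neg (by omega)]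
    omega
  cases b? with
  | none =>
      rw [PySem.List.slice_some_none, h2]
      exact List.drop_length
  | some b =>
      apply List.eq_nil_of_length_eq_zero
      rw [PySem.List.length_slice, h2]
      have h1 := PySem.List.clampIdx_le row.length b
      omega

-- a slice with nonnegative stop at or before the start is empty
theorem slice_nil_of_le (row : List String) (s e : Int) (h0 : 0 ≤ e) (h : e ≤ s) :
    PySem.List.slice row (some s) (some e) = [] := by
  apply List.eq_nil_of_length_eq_zero
  rw [PySem.List.length_slice]
  have hm : PySem.List.clampIdx row.length e ≤ PySem.List.clampIdx row.length s := by
    unfold PySem.List.clampIdx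
    rw [if_neg (by omega), if_neg (by omega)]
    omega
  omega

-- every slice of the empty list is empty
theorem slice_nil_row (s : Int) (b? : Option Int) :
    PySem.List.slice ([] : List String) (some s) b? = [] := by
  cases b? with
  | none =>
      rw [PySem.List.slice_some_none]
      simp
  | some b =>
      apply List.eq_nil_of_length_eq_zero
      rw [PySem.List.length_slice]
      have h1 := PySem.List.clampIdx_le ([] : List String).length b
      have h2 := PySem.List.clampIdx_le ([] : List String).length s
      simp only [List.length_nil, Nat.le_zero] at h1 h2
      simp only [List.length_nil]
      omega

-- a list of negative numbers has a nonpositive sum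
theorem sum_nonpos_of_all_neg (ls : List Int) (h : ∀ l ∈ ls, l < 0) : ls.sum ≤ 0 := by
  induction ls with
  | nil => simp
  | cons a t ih =>
    simp only [List.sum_cons]
    have h1 := h a List.mem_cons_self
    have h2 := ih (fun x hx => h x (List.mem_cons_of_mem _ hx))
    omega

-- A's guarded chunk is empty whenever the run rewinds (0 ≤ end ≤ start)
theorem chunkA_nil_of_rewind (row : List String) (s e : Int) (h0 : 0 ≤ e) (hle : e ≤ s) :
    (if e ≤ (row.length : Int)
      then PySem.List.slice row (some s) (some e)
      else PySem.List.slice row (some s) none) = [] := by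
  split_ifs with h
  · exact slice_nil_of_le row s e h0 hle
  · exact slice_nil_of_ge row s (by omega) none

-- on the empty row, every run of either program merges to ""
theorem fold_nilrow (ls : List Int) (s : Int) (out : List String) :
    (ls.foldl (fun (st : List String × Int) length =>
        let e := st.2 + length
        let chunk := if e ≤ (([] : List String).length : Int)
          then PySem.List.slice ([] : List String) (some st.2) (some e)
          else PySem.List.slice ([] : List String) (some st.2) none
        (st.1 ++ [PySem.Str.join " "
          ((chunk.filter (fun c => PySem.Str.strip c != "")).map PySem.Str.strip)], e))
      (out, s)).1
    = (ls.foldl (fun (st : List String × List String) length =>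
        let r := pvPullRun st.2 length.toNat []
        (st.1 ++ [PySem.Str.join " " r.1], r.2)) (out, ([] : List String))).1 := by
  induction ls generalizing s out with
  | nil => rfl
  | cons l ls ih =>
    simp only [List.foldl_cons]
    have hch : (if s + l ≤ ((([] : List String)).length : Int)
        then PySem.List.slice ([] : List String) (some s) (some (s + l))
        else PySem.List.slice ([] : List String) (some s) none) = [] := by
      split_ifs <;> exact slice_nil_row _ _
    rw [hch]
    have hB : pvPullRun [] l.toNat [] = ([], []) := by cases h : l.toNat <;> simp [pvPullRun]
    rw [hB]
    simp only [List.filter_nil, List.map_nil]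
    exact ih _ _

-- an all-negative tail with a nonnegative total: every remaining run rewinds with a
-- nonnegative end boundary, so A's chunks are all empty and B (range of a negative pulls
-- nothing) emits "" alike, whatever B's iterator still holds
theorem fold_allneg (row : List String) (ls : List Int) (s : Int) (rem out : List String)
    (hneg : ∀ l ∈ ls, l < 0) (hsum : 0 ≤ s + ls.sum) :
    (ls.foldl (fun (st : List String × Int) length =>
        let e := st.2 + length
        let chunk := if e ≤ (row.length : Int)
          then PySem.List.slice row (some st.2) (some e)
          else PySem.List.slice row (some st.2) none
        (st.1 ++ [PySem.Str.join " "
          ((chunk.filter (fun c => PySem.Str.strip c != "")).map PySem.Str.strip)], e))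
      (out, s)).1
    = (ls.foldl (fun (st : List String × List String) length =>
        let r := pvPullRun st.2 length.toNat []
        (st.1 ++ [PySem.Str.join " " r.1], r.2)) (out, rem)).1 := by
  induction ls generalizing s rem out with
  | nil => rfl
  | cons l ls ih =>
    have hl : l < 0 := hneg l List.mem_cons_self
    have hts : ls.sum ≤ 0 :=
      sum_nonpos_of_all_neg ls (fun x hx => hneg x (List.mem_cons_of_mem _ hx))
    have he : 0 ≤ s + l := by
      simp only [List.sum_cons] at hsum
      omega
    simp only [List.foldl_cons]
    rw [chunkA_nil_of_rewind row s (s + l) he (by omega)]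
    have hB : pvPullRun rem l.toNat [] = ([], rem) := by
      have : l.toNat = 0 := by omega
      rw [this]
      cases rem <;> rfl
    rw [hB]
    simp only [List.filter_nil, List.map_nil]
    apply ih _ rem _ (fun x hx => hneg x (List.mem_cons_of_mem _ hx))
    simp only [List.sum_cons] at hsum
    omega

-- loop invariant: under Pre_'s per-negative condition (relativised to the running sum s),
-- A's fold from (out, s) matches B's fold from (out, rem), where either s = k with
-- rem = row.drop k (still walking the row), or s ≥ len(row) and B's iterator is exhausted
theorem fold_eq (row : List String) (ls : List Int) (s : Int) (rem out : List String)
    (hpre : ∀ i, i < ls.length → ls.getD i 0 < 0 →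
      (row.length : Int) ≤ s + ((ls.take (i + 1)).sum) ∨
      ((∀ j, j < ls.length → i ≤ j → ls.getD j 0 < 0) ∧ 0 ≤ s + ls.sum))
    (hinv : (∃ k : Nat, s = (k : Int) ∧ rem = row.drop k) ∨ ((row.length : Int) ≤ s ∧ rem = [])) :
    (ls.foldl (fun (st : List String × Int) length =>
        let e := st.2 + length
        let chunk := if e ≤ (row.length : Int)
          then PySem.List.slice row (some st.2) (some e)
          else PySem.List.slice row (some st.2) none
        (st.1 ++ [PySem.Str.join " "
          ((chunk.filter (fun c => PySem.Str.strip c != "")).map PySem.Str.strip)], e))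
      (out, s)).1
    = (ls.foldl (fun (st : List String × List String) length =>
        let r := pvPullRun st.2 length.toNat []
        (st.1 ++ [PySem.Str.join " " r.1], r.2)) (out, rem)).1 := by
  induction ls generalizing s rem out with
  | nil => rfl
  | cons l ls ih =>
    have hpre' : ∀ i, i < ls.length → ls.getD i 0 < 0 →
        (row.length : Int) ≤ (s + l) + ((ls.take (i + 1)).sum) ∨
        ((∀ j, j < ls.length → i ≤ j → ls.getD j 0 < 0) ∧ 0 ≤ (s + l) + ls.sum) := by
      intro i hi hneg
      rcases hpre (i + 1) (by simpa using Nat.succ_lt_succ hi) (by simpa using hneg) with h | ⟨ha, hs⟩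
      · exact Or.inl (by simpa [List.sum_cons, add_assoc] using h)
      · refine Or.inr ⟨fun j hj hij => ha (j + 1) (by simpa using Nat.succ_lt_succ hj) (by omega), ?_⟩
        simpa [List.sum_cons, add_assoc] using hs
    by_cases hl : 0 ≤ l
    · -- nonnegative run
      rcases hinv with ⟨k, hs, hrem⟩ | ⟨hge, hrem⟩
      · -- still walking the row: A slices [k, k+l), B pulls l cells
        subst hs hrem
        have hcast : (k : Int) + l = ((k + l.toNat : Nat) : Int) := by push_cast; omega
        rw [hcast] at hpre'
        simp only [List.foldl_cons]
        rw [hcast, chunkA_eq row k l.toNat, merged_eq, pvPullRun_eq, List.nil_append,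
          List.drop_drop]
        dsimp only
        exact ih _ _ _ hpre' (Or.inl ⟨k + l.toNat, rfl, rfl⟩)
      · -- past the end: A's chunk starts at or past len(row), B's iterator is exhausted
        subst hrem
        simp only [List.foldl_cons]
        have hch : (if s + l ≤ ((row.length : Nat) : Int)
            then PySem.List.slice row (some s) (some (s + l))
            else PySem.List.slice row (some s) none) = [] := by
          split_ifs <;> exact slice_nil_of_ge row s hge _
        rw [hch]
        have hB : pvPullRun [] l.toNat [] = ([], []) := by cases h : l.toNat <;> simp [pvPullRun]
        rw [hB]
        simp only [List.filter_nil, List.map_nil]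
        exact ih _ _ _ hpre' (Or.inr ⟨by omega, rfl⟩)
    · -- a negative run: Pre_ gives 'row exhausted at its end' or 'all-negative tail'
      rcases hpre 0 (by simp) (by simpa using (by omega : l < 0)) with hk | ⟨ha, hs⟩
      · simp only [List.take_succ_cons, List.take_zero, List.sum_cons, List.sum_nil,
          add_zero] at hk
        -- len(row) ≤ s + l: the chunk is empty and both sides are exhausted afterwards
        have hsge : (row.length : Int) ≤ s := by omega
        simp only [List.foldl_cons]
        have hch : (if s + l ≤ ((row.length : Nat) : Int)
            then PySem.List.slice row (some s) (some (s + l))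
            else PySem.List.slice row (some s) none) = [] := by
          split_ifs <;> exact slice_nil_of_ge row s hsge _
        rw [hch]
        have hrem0 : rem = [] := by
          rcases hinv with ⟨k, hsk, hrem⟩ | ⟨_, hrem⟩
          · rw [hrem]; exact List.drop_eq_nil_of_le (by omega)
          · exact hrem
        subst hrem0
        have hB : pvPullRun [] l.toNat [] = ([], []) := by cases h : l.toNat <;> simp [pvPullRun]
        rw [hB]
        simp only [List.filter_nil, List.map_nil]
        exact ih _ _ _ hpre' (Or.inr ⟨by omega, rfl⟩)
      · -- all-negative tail with nonnegative total
        have hneg : ∀ x ∈ l :: ls, x < 0 := by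
          intro x hx
          obtain ⟨j, hj, hxj⟩ := List.getElem_of_mem hx
          have := ha j (by simpa using hj) (Nat.zero_le _)
          rw [List.getD_eq_getElem?_getD, List.getElem?_eq_getElem hj] at this
          simpa [hxj] using this
        have hs0 : 0 ≤ s := by
          rcases hinv with ⟨k, hsk, _⟩ | ⟨hge, _⟩
          · subst hsk; positivity
          · exact le_trans (by positivity) hge
        exact fold_allneg row (l :: ls) s rem out hneg hs

-- ===== VERDICT (by name: the statement is the Claim_ definition above) =====
theorem merge_data_row_by_runs_spec : Claim_equal_merge_data_row_by_runs := by
  intro row run_lengths _ hpre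
  unfold Spec_merge_data_row_by_runs merge_data_row_by_runs merge_data_row_by_runs_alt
  rcases hpre with hnil | hpre
  · subst hnil
    exact fold_nilrow run_lengths 0 []
  · exact fold_eq row run_lengths 0 row []
      (by intro i hi hneg
          rcases hpre i hi hneg with h | h
          · exact Or.inl (by simpa using h)
          · exact Or.inr (by simpa using h))
      (Or.inl ⟨0, rfl, rfl⟩)
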